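-- pv_equiv track=rewrite | github.com/jramaswami/Binary_Search_Python | contiguously_increasing_numbers.py | solve
-- ===== SOURCE A (Python) =====
-- def solve(start, end):
--
--     def next_number(i):
--         return (10 * i) + ((i % 10) + 1)
--
--     MAX_NUM = 123456789
--
--     A = list(range(1, 10))
--     soln = list(A)
--     while soln[-1] < MAX_NUM:
--         B = [next_number(i) for i in A[:-1]]
--         soln.extend(B)
--         A = B
--     return [i for i in soln if i >= start and i <= end]
-- ===== SOURCE B (Python) =====
-- def solve(start, end):
--     # B: enumerate contiguous substrings of "123456789" by length then offset,
--     # instead of A's arithmetic recurrence; same order, then the same filter.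
--     s = "123456789"
--     nums = [int(s[off:off + length]) for length in range(1, 10) for off in range(0, 10 - length)]
--     return [n for n in nums if start <= n <= end]
-- ===== Notes on version B (the rewrite author's own statement) =====
-- stated objective: simpler
-- what changed: A generates the numbers by an arithmetic recurrence (next tier = 10*i + last_digit+1) in a while loop; B simply enumerates the contiguous substrings of "123456789" by length then offset and converts them with int().
import Mathlib
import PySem

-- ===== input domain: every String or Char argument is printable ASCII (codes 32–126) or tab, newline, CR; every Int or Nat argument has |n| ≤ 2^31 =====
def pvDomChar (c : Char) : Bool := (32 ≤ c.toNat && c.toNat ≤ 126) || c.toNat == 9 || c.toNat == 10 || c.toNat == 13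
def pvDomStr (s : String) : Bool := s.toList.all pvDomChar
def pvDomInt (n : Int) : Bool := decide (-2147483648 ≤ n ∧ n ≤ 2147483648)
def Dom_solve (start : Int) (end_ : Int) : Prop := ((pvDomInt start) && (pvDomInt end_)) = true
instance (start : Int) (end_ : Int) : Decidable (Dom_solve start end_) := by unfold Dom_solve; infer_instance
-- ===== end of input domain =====

-- B replaces A's arithmetic-recurrence while loop by enumerating the contiguous
-- substrings of "123456789" (length then offset); objective: simpler.


-- ===== PORT A =====
-- next_number(i) = (10 * i) + ((i % 10) + 1); Python % ported with PySem.Int.mod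
def nextNumber (i : Int) : Int := (10 * i) + ((PySem.Int.mod i 10) + 1)

-- the while loop: condition soln[-1] < MAX_NUM (soln is never empty, so soln[-1]
-- is its last element); A[:-1] is dropLast. The 'A = []' case only serves
-- termination and is unreachable from solve's initial A = [1..9].
-- fuel = 9 ≥ the number of loop iterations (each iteration shortens A by one and
-- the loop exits once soln ends in 123456789, after 8 iterations); fuel only
-- makes the recursion structural, it never cuts the computation short.
def solveLoop : Nat → List Int → List Int → List Int
  | 0, _, soln => soln
  | fuel + 1, A, soln =>
    if soln.getLastD 0 < 123456789 then
      let B := A.dropLast.map nextNumber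
      solveLoop fuel B (soln ++ B)
    else soln

def solve (start : Int) (end_ : Int) : List Int :=
  (solveLoop 9 (PySem.List.pyRange 1 10 1) (PySem.List.pyRange 1 10 1)).filter
    (fun i => decide (i ≥ start) && decide (i ≤ end_))

-- ===== PORT B =====
-- int(s[off:off+length]) never raises here (nonempty digit string), so getD 0 is exact
def solve_alt (start : Int) (end_ : Int) : List Int :=
  ((PySem.List.pyRange 1 10 1).flatMap (fun length =>
    (PySem.List.pyRange 0 (10 - length) 1).map (fun off =>
      (PySem.Int.ofStr? (PySem.Str.slice "123456789" (some off) (some (off + length)))).getD 0))).filter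
    (fun n => decide (start ≤ n) && decide (n ≤ end_))

-- ===== PRECONDITION & SPEC =====
def Spec_solve (start : Int) (end_ : Int) (out : List Int) : Prop := out = solve_alt start end_
instance (start : Int) (end_ : Int) (out : List Int) : Decidable (Spec_solve start end_ out) := by unfold Spec_solve; infer_instance

-- ===== CLAIM (what is proved, stated in full; the proofs are below) =====
def Claim_equal_solve : Prop := ∀ (start : Int) (end_ : Int), Dom_solve start end_ → Spec_solve start end_ (solve start end_)

-- ===== LEMMAS AND PROOFS =====

-- both generators produce the same fixed list of 45 numbers
theorem gen_eq :
    solveLoop 9 (PySem.List.pyRange 1 10 1) (PySem.List.pyRange 1 10 1) =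
    (PySem.List.pyRange 1 10 1).flatMap (fun length =>
      (PySem.List.pyRange 0 (10 - length) 1).map (fun off =>
        (PySem.Int.ofStr? (PySem.Str.slice "123456789" (some off) (some (off + length)))).getD 0)) := by
  decide

-- ===== VERDICT (by name: the statement is the Claim_ definition above) =====
theorem solve_spec : Claim_equal_solve := by
  intro start end_ _
  unfold Spec_solve solve solve_alt
  rw [gen_eq]
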